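-- pv_equiv track=rewrite | github.com/Bhasheyam/ALgorithms-PythonSolved | increaseNumberRoundness.py | increaseNumberRoundness
-- ===== SOURCE A (Python) =====
-- def increaseNumberRoundness(n):
--     n1=str(n).count("0")
--     i=0
--     t1=str(n)[::-1]
--     count=0
--     while i < len( t1 ):
--         if t1[i] == "0" :
--             count += 1
--             i += 1
--         else:
--             if(count< n1):
--                 return True
--             else:
--                 return False
--
--
--     return False
-- ===== SOURCE B (Python) =====
-- def increaseNumberRoundness(n):
--     return "0" in str(n).rstrip("0")
-- ===== Notes on version B (the rewrite author's own statement) =====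
-- stated objective: simpler
-- what changed: Replaces A's reverse-the-string-and-scan loop with explicit zero counting by a single rstrip('0') of the trailing-zero run followed by a substring membership test.
import Mathlib
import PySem

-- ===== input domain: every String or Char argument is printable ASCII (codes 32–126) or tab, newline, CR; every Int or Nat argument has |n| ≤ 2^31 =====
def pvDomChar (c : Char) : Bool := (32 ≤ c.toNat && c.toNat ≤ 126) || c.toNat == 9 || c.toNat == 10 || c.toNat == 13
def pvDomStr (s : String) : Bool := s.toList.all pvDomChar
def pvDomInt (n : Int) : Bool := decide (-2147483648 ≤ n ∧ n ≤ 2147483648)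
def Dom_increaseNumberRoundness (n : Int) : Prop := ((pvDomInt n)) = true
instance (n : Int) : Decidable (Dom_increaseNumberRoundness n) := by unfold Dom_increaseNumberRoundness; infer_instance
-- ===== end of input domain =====

-- B replaces A's reverse-and-scan counting loop with rstrip('0') + substring membership; objective: simpler.


-- ===== PORT A =====
-- the while loop: walks the reversed digits, counting the leading '0'-run; at the first
-- non-'0' returns (count < n1); falls off the end with False
def pvLoopA (n1 : Nat) : List Char → Nat → Bool
  | [], _ => false
  | c :: rest, count => if c == '0' then pvLoopA n1 rest (count + 1) else decide (count < n1)

def increaseNumberRoundness (n : Int) : Bool :=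
  let n1 := PySem.Str.count (PySem.Int.toStr n) "0"          -- n1 = str(n).count("0")
  -- t1 = str(n)[::-1]; step -1 ≠ 0 so slice? is always `some`, .getD "" just unwraps it
  let t1 := (PySem.Str.slice? (PySem.Int.toStr n) none none (-1)).getD ""
  pvLoopA n1 t1.toList 0

-- ===== PORT B =====
def increaseNumberRoundness_alt (n : Int) : Bool :=
  let s := PySem.Int.toChars n
  -- s.rstrip("0"): drop exactly the trailing run of '0' characters (exact for a 1-char strip set)
  let stripped := (s.reverse.dropWhile (· == '0')).reverse
  PySem.Chars.isIn ['0'] stripped                             -- "0" in stripped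

-- ===== PRECONDITION & SPEC =====
def Spec_increaseNumberRoundness (n : Int) (out : Bool) : Prop := out = increaseNumberRoundness_alt n
instance (n : Int) (out : Bool) : Decidable (Spec_increaseNumberRoundness n out) := by unfold Spec_increaseNumberRoundness; infer_instance

-- ===== CLAIM (what is proved, stated in full; the proofs are below) =====
def Claim_equal_increaseNumberRoundness : Prop := ∀ (n : Int), Dom_increaseNumberRoundness n → Spec_increaseNumberRoundness n (increaseNumberRoundness n)

-- ===== LEMMAS AND PROOFS =====

-- Chars.count with a single-character needle is List.count
theorem pv_countgo_single (l : List Char) : ∀ (fuel acc : Nat), l.length ≤ fuel →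
    PySem.Chars.count.go ['0'] fuel l acc = acc + l.count '0' := by
  induction l with
  | nil => intro fuel acc _; cases fuel <;> simp [PySem.Chars.count.go]
  | cons x t ih =>
    intro fuel acc h
    cases fuel with
    | zero => simp at h
    | succ f =>
      simp only [PySem.Chars.count.go]
      by_cases hx : x = '0'
      · subst hx
        have : List.isPrefixOf ['0'] ('0' :: t) = true := by simp [List.isPrefixOf]
        simp [this, ih f (acc + 1) (by simpa using h)]
        omega
      · have : List.isPrefixOf ['0'] (x :: t) = false := by
          simp [List.isPrefixOf]; exact fun h => absurd h.symm hx
        simp [this, ih f acc (by simpa using h), hx]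

theorem pv_count_single (l : List Char) : PySem.Chars.count l ['0'] = l.count '0' := by
  simpa using pv_countgo_single l l.length 0 le_rfl

-- "0" in s  is  '0' ∈ s
theorem pv_isIn_single (l : List Char) : PySem.Chars.isIn ['0'] l = decide ('0' ∈ l) := by
  by_cases h : '0' ∈ l
  · obtain ⟨s, t, rfl⟩ := List.append_of_mem h
    have : ['0'] <:+: s ++ '0' :: t := ⟨s, t, by simp⟩
    simp [h, (PySem.Chars.isIn_iff_infix _ _).mpr this]
  · have : ¬ (['0'] <:+: l) := fun hi => h (hi.subset (List.mem_singleton_self _))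
    simp [h, (PySem.Chars.isIn_eq_false_iff _ _).mpr this]

-- loop invariant: scanning r with accumulated count c and total n1 = c + r.count '0'
theorem pv_loop_char (r : List Char) : ∀ (c : Nat),
    pvLoopA (c + r.count '0') r c = decide ('0' ∈ r.dropWhile (· == '0')) := by
  induction r with
  | nil => intro c; simp [pvLoopA]
  | cons x t ih =>
    intro c
    by_cases hx : x = '0'
    · subst hx
      have h1 : (c + ('0' :: t).count '0') = (c + 1) + t.count '0' := by
        simp; omega
      simp only [h1, pvLoopA, List.dropWhile]
      simpa using ih (c + 1)
    · have hb : (x == '0') = false := by simp [hx]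
      have hc : (x :: t).count '0' = t.count '0' := by
        simp [List.count_cons]
        exact hx
      simp only [pvLoopA, List.dropWhile, hb, if_neg Bool.false_ne_true, hc]
      have hmem : ('0' ∈ x :: t) ↔ ('0' ∈ t) := by
        simp [List.mem_cons, Ne.symm hx]
      have hlt : (c < c + t.count '0') ↔ ('0' ∈ x :: t) := by
        rw [hmem]
        constructor
        · intro h; exact List.count_pos_iff.mp (by omega)
        · intro h; have := List.count_pos_iff.mpr h; omega
      simp [hlt, hmem]

theorem pv_main (n : Int) : increaseNumberRoundness n = increaseNumberRoundness_alt n := by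
  unfold increaseNumberRoundness increaseNumberRoundness_alt
  simp only [PySem.Str.slice?_none_none_neg_one, Option.getD_some]
  rw [show PySem.Str.count (PySem.Int.toStr n) "0" = PySem.Chars.count (PySem.Int.toStr n).toList ['0'] from by simp [PySem.Str.count]]
  rw [pv_count_single, pv_isIn_single]
  have hs : (String.ofList (PySem.Int.toStr n).toList.reverse).toList = (PySem.Int.toStr n).toList.reverse :=
    String.toList_ofList
  rw [hs]
  have := pv_loop_char ((PySem.Int.toStr n).toList.reverse) 0
  simp only [Nat.zero_add, List.count_reverse] at this
  rw [PySem.Int.toList_toStr] at this ⊢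
  rw [this]
  simp

-- ===== VERDICT (by name: the statement is the Claim_ definition above) =====
theorem increaseNumberRoundness_spec : Claim_equal_increaseNumberRoundness := by
  intro n _
  unfold Spec_increaseNumberRoundness
  exact pv_main n
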